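-- pv_equiv track=rewrite | github.com/RDUCK-LHY/meal-bot | app.py | merge_close_positions
-- ===== SOURCE A (Python) =====
-- def merge_close_positions(values, gap=10):
--     if not values:
--         return []
--
--     values = sorted(values)
--     groups = [[values[0]]]
--
--     for v in values[1:]:
--         if abs(v - groups[-1][-1]) <= gap:
--             groups[-1].append(v)
--         else:
--             groups.append([v])
--
--     return [int(sum(g) / len(g)) for g in groups]
-- ===== SOURCE B (Python) =====
-- def merge_close_positions(values, gap=10):
--     s = sorted(values)
--     n = len(s)
--     if n == 0:
--         return []
--     breaks = [0] + [i for i in range(1, n) if s[i] - s[i - 1] > gap] + [n]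
--     return [int(sum(s[a:b]) / (b - a)) for a, b in zip(breaks, breaks[1:])]
-- ===== Notes on version B (the rewrite author's own statement) =====
-- stated objective: alternative
-- what changed: Instead of growing nested group lists incrementally, B sorts, computes the break indices (where consecutive sorted values differ by more than gap) in a separate filtered-range pass, and then slices the sorted list between consecutive boundaries, mapping each slice to its truncated mean.
import Mathlib
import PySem

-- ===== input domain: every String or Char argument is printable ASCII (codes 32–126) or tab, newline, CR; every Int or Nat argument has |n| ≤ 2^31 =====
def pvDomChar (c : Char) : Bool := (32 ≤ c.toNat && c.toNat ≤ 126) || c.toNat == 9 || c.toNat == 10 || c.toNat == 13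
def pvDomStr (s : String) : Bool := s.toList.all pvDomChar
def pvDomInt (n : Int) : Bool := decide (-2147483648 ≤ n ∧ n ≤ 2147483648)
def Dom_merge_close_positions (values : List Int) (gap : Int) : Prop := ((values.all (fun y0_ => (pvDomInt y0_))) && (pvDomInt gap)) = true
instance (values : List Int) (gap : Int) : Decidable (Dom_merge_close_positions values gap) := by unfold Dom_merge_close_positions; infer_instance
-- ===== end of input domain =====

-- B computes the group boundaries (indices where the sorted gap is exceeded) in a separate
-- pass and then slices the sorted list at those boundaries, instead of growing nested group
-- lists incrementally (objective: alternative decomposition, same asymptotic cost).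


-- ===== PORT A =====
-- Python's groups list (appends at the right end of the last group / of the groups list) is
-- kept fully reversed (outer list and each group), so each append is a cons; it is reversed
-- back before the final mean computation.  int(sum(g)/len(g)) is Int.tdiv (truncation toward
-- zero, exact where CPython's float quotient truncates to the true quotient).
def stepA (gap : Int) (gs : List (List Int)) (v : Int) : List (List Int) :=
  match gs with
  | g :: rest => if |v - g.headI| ≤ gap then (v :: g) :: rest else [v] :: g :: rest
  | [] => [[v]]

def merge_close_positions (values : List Int) (gap : Int) : List Int :=
  if values = [] then []
  else
    let s := PySem.List.sorted values (fun x => x) false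
    let groupsR := (PySem.List.slice s (some 1) none).foldl (stepA gap)
      [[PySem.List.pyGetD s 0 0]]
    (groupsR.reverse.map List.reverse).map (fun g => g.sum.tdiv (g.length : Int))

-- ===== PORT B =====
-- Source B: sort, compute the break indices by a filtered range, slice between consecutive
-- boundaries; int(sum(seg)/(b-a)) is Int.tdiv as above.
def merge_close_positions_alt (values : List Int) (gap : Int) : List Int :=
  let s := PySem.List.sorted values (fun x => x) false
  let n : Int := s.length
  if n = 0 then []
  else
    let breaks := 0 :: ((PySem.List.pyRange 1 n 1).filter
        (fun i => decide (PySem.List.pyGetD s i 0 - PySem.List.pyGetD s (i - 1) 0 > gap))) ++ [n]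
    (breaks.zip breaks.tail).map
      (fun p => ((PySem.List.slice s (some p.1) (some p.2)).sum).tdiv (p.2 - p.1))

-- ===== PRECONDITION & SPEC =====
def Spec_merge_close_positions (values : List Int) (gap : Int) (out : List Int) : Prop := out = merge_close_positions_alt values gap
instance (values : List Int) (gap : Int) (out : List Int) : Decidable (Spec_merge_close_positions values gap out) := by unfold Spec_merge_close_positions; infer_instance

-- ===== CLAIM (what is proved, stated in full; the proofs are below) =====
def Claim_equal_merge_close_positions : Prop := ∀ (values : List Int) (gap : Int), Dom_merge_close_positions values gap → Spec_merge_close_positions values gap (merge_close_positions values gap)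

-- ===== LEMMAS AND PROOFS =====

-- Reference grouping: gsplit gap x t = the groups of the sorted list x :: t, first element x.
def gsplit (gap : Int) (x : Int) : List Int → List (List Int)
  | [] => [[x]]
  | v :: t =>
    if |v - x| ≤ gap then
      match gsplit gap v t with
      | [] => [[x]]
      | g :: gs => (x :: g) :: gs
    else [x] :: gsplit gap v t

def prependFirst (p : List Int) : List (List Int) → List (List Int)
  | [] => [p]
  | g :: gs => (p ++ g) :: gs

-- break indices of x :: t relative to absolute position c of x
def boundsOf (gap : Int) : Nat → Int → List Int → List Int
  | _, _, [] => []
  | c, x, v :: t =>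
    if v - x > gap then ((c : Int) + 1) :: boundsOf gap (c + 1) v t
    else boundsOf gap (c + 1) v t

-- cumulative boundary positions: c, c+L₀, c+L₀+L₁, …
def cums : Nat → List Nat → List Int
  | c, [] => [(c : Int)]
  | c, L :: Ls => (c : Int) :: cums (c + L) Ls

theorem gsplit_ne_nil (gap x : Int) (t : List Int) : gsplit gap x t ≠ [] := by
  cases t with
  | nil => simp [gsplit]
  | cons v t' =>
    simp only [gsplit]
    split
    · cases h : gsplit gap v t' <;> simp
    · simp

theorem flatten_gsplit (gap x : Int) (t : List Int) : (gsplit gap x t).flatten = x :: t := by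
  induction t generalizing x with
  | nil => simp [gsplit]
  | cons v t' ih =>
    simp only [gsplit]
    split
    · cases h : gsplit gap v t' with
      | nil => exact absurd h (gsplit_ne_nil gap v t')
      | cons g gs =>
        have := ih v
        rw [h] at this
        simpa using this
    · simpa using ih v

theorem cums_eq_cons (c : Nat) (Ls : List Nat) :
    cums c Ls = (c : Int) :: (cums c Ls).tail := by
  cases Ls <;> rfl

-- A's fold, with the accumulated reversed groups generalized, produces gsplit.
theorem foldA (gap : Int) (t : List Int) : ∀ (x : Int) (cur : List Int) (done : List (List Int)),
    ((t.foldl (stepA gap) ((x :: cur) :: done)).reverse.map List.reverse)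
    = (done.reverse.map List.reverse) ++ prependFirst cur.reverse (gsplit gap x t) := by
  induction t with
  | nil =>
    intro x cur done
    simp [gsplit, prependFirst]
  | cons v t' ih =>
    intro x cur done
    rw [List.foldl_cons]
    have hstep : stepA gap ((x :: cur) :: done) v
        = if |v - x| ≤ gap then ((v :: x :: cur) :: done) else ([v] :: (x :: cur) :: done) := rfl
    rw [hstep]
    by_cases h : |v - x| ≤ gap
    · rw [if_pos h]
      have := ih v (x :: cur) done
      rw [this]
      simp only [gsplit, if_pos h]
      cases hg : gsplit gap v t' with
      | nil => exact absurd hg (gsplit_ne_nil gap v t')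
      | cons g gs => simp [prependFirst]
    · rw [if_neg h]
      have := ih v [] ((x :: cur) :: done)
      rw [this]
      simp only [gsplit, if_neg h]
      cases hg : gsplit gap v t' with
      | nil => exact absurd hg (gsplit_ne_nil gap v t')
      | cons g gs => simp [prependFirst]

-- The cumulative group lengths of gsplit are exactly base :: breaks ++ [end].
theorem cums_gsplit (gap : Int) (t : List Int) : ∀ (x : Int) (c : Nat),
    (x :: t).Pairwise (· ≤ ·) →
    cums c ((gsplit gap x t).map List.length)
      = (c : Int) :: (boundsOf gap c x t ++ [((c + t.length + 1 : Nat) : Int)]) := by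
  induction t with
  | nil =>
    intro x c _
    simp [gsplit, cums, boundsOf]
  | cons v t' ih =>
    intro x c hp
    have hxv : x ≤ v := (List.pairwise_cons.1 hp).1 v (by simp)
    have hp' : (v :: t').Pairwise (· ≤ ·) := (List.pairwise_cons.1 hp).2
    have habs : |v - x| = v - x := abs_of_nonneg (by omega)
    by_cases h : v - x > gap
    · have hng : ¬ |v - x| ≤ gap := by rw [habs]; omega
      simp only [gsplit, if_neg hng, boundsOf, if_pos h, List.map_cons, cums, List.length_cons, List.length_nil]
      have := ih v (c + 1) hp'
      rw [this, show ((c + 1 : Nat) : Int) = (c : Int) + 1 by push_cast; ring,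
        show c + 1 + t'.length + 1 = c + (t'.length + 1) + 1 from by omega]
      simp [List.cons_append]
    · have hyg : |v - x| ≤ gap := by rw [habs]; omega
      simp only [gsplit, if_pos hyg, boundsOf, if_neg h]
      cases hg : gsplit gap v t' with
      | nil => exact absurd hg (gsplit_ne_nil gap v t')
      | cons g gs =>
        have := ih v (c + 1) hp'
        rw [hg] at this
        simp only [List.map_cons, cums, List.length_cons] at this ⊢
        have htail := (List.cons_eq_cons.mp this).2
        rw [show c + (g.length + 1) = c + 1 + g.length by omega, htail]
        rw [show c + 1 + t'.length + 1 = c + (t'.length + 1) + 1 by omega]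


-- The filtered index range of port B equals boundsOf, read off a suffix of s.
theorem rangeF (gap : Int) (s : List Int) (t : List Int) : ∀ (x : Int) (c : Nat),
    s.drop c = x :: t →
    (PySem.List.pyRange ((c : Int) + 1) (s.length : Int) 1).filter
        (fun i => decide (PySem.List.pyGetD s i 0 - PySem.List.pyGetD s (i - 1) 0 > gap))
      = boundsOf gap c x t := by
  induction t with
  | nil =>
    intro x c hdrop
    have hc : c + 1 = s.length := by
      have := congrArg List.length hdrop
      simp [List.length_drop] at this
      omega
    rw [boundsOf, PySem.List.pyRange_one_eq_nil (by omega)]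
    rfl
  | cons v t' ih =>
    intro x c hdrop
    have hlen : c + 1 < s.length := by
      have := congrArg List.length hdrop
      simp [List.length_drop] at this
      omega
    have hsx : s[c]? = some x := by
      have : (s.drop c)[0]? = some x := by rw [hdrop]; rfl
      simpa using this
    have hsv : s[c + 1]? = some v := by
      have : (s.drop c)[1]? = some v := by rw [hdrop]; rfl
      simpa using this
    have hgx : PySem.List.pyGetD s ((c : Int)) 0 = x := by
      rw [PySem.List.pyGetD_natCast]
      simp [List.getD, hsx]
    have hgv : PySem.List.pyGetD s ((c : Int) + 1) 0 = v := by
      have : ((c : Int) + 1) = ((c + 1 : Nat) : Int) := by push_cast; ring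
      rw [this, PySem.List.pyGetD_natCast]
      simp [List.getD, hsv]
    rw [PySem.List.pyRange_one_cons (by exact_mod_cast hlen)]
    have hdrop' : s.drop (c + 1) = v :: t' := by
      have : s.drop (c + 1) = (s.drop c).tail := by
        rw [← List.tail_drop]
      rw [this, hdrop]; rfl
    have hrec := ih v (c + 1) hdrop'
    simp only [List.filter_cons]
    have hsub : (c : Int) + 1 - 1 = (c : Int) := by ring
    rw [boundsOf]
    have hrec' : (PySem.List.pyRange ((c : Int) + 1 + 1) (s.length : Int) 1).filter
        (fun i => decide (PySem.List.pyGetD s i 0 - PySem.List.pyGetD s (i - 1) 0 > gap))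
        = boundsOf gap (c + 1) v t' := by
      rw [show (c : Int) + 1 + 1 = ((c + 1 : Nat) : Int) + 1 by push_cast; ring]
      exact hrec
    by_cases h : v - x > gap
    · rw [if_pos h]
      have hc' : (decide (PySem.List.pyGetD s ((c:Int)+1) 0 - PySem.List.pyGetD s ((c:Int)+1-1) 0 > gap)) = true := by
        rw [hsub, hgx, hgv]; simpa using h
      rw [hc', if_pos rfl, hrec']
    · rw [if_neg h]
      have hc' : (decide (PySem.List.pyGetD s ((c:Int)+1) 0 - PySem.List.pyGetD s ((c:Int)+1-1) 0 > gap)) = false := by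
        rw [hsub, hgx, hgv]; simpa using h
      rw [hc', if_neg (by simp), hrec']

-- Slicing s at the cumulative boundaries recovers the groups' means.
theorem sliceMap (gs : List (List Int)) : ∀ (c : Nat) (s : List Int),
    s.drop c = gs.flatten →
    ((cums c (gs.map List.length)).zip (cums c (gs.map List.length)).tail).map
        (fun p => ((PySem.List.slice s (some p.1) (some p.2)).sum).tdiv (p.2 - p.1))
      = gs.map (fun g => g.sum.tdiv (g.length : Int)) := by
  induction gs with
  | nil => intro c s _; simp [cums]
  | cons g gs' ih =>
    intro c s hdrop
    simp only [List.map_cons, cums]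
    rw [cums_eq_cons (c + g.length)]
    simp only [List.zip_cons_cons, List.tail_cons, List.map_cons]
    have hslice : PySem.List.slice s (some (c : Int)) (some ((c + g.length : Nat) : Int)) = g := by
      rw [show ((c + g.length : Nat) : Int) = (c : Int) + (g.length : Int) by push_cast; ring,
        PySem.List.slice_natCast_add, hdrop]
      simp [List.flatten]
    congr 1
    · rw [hslice]
      congr 1
      push_cast; ring
    · rw [← cums_eq_cons (c + g.length)]
      apply ih
      have : s.drop (c + g.length) = (s.drop c).drop g.length := by
        rw [List.drop_drop]
      rw [this, hdrop]
      simp [List.flatten]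

-- ===== VERDICT (by name: the statement is the Claim_ definition above) =====
theorem merge_close_positions_spec : Claim_equal_merge_close_positions := by
  intro values gap _
  unfold Spec_merge_close_positions
  simp only [merge_close_positions, merge_close_positions_alt]
  by_cases hv : values = []
  · subst hv; simp
  · rw [if_neg hv]
    set s := PySem.List.sorted values (fun x => x) false with hs
    have hsn : s ≠ [] := by
      intro h
      exact hv ((PySem.List.sorted_eq_nil_iff values (fun x => x) false).1 (hs ▸ h))
    obtain ⟨x, t, hst⟩ := List.exists_cons_of_ne_nil hsn
    have hlen0 : ¬ ((s.length : Int) = 0) := by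
      simp [hst]
      omega
    rw [if_neg hlen0]
    -- A side
    have hget0 : PySem.List.pyGetD s 0 0 = x := by rw [hst]; simp [PySem.List.pyGetD_zero_cons]
    have htail : PySem.List.slice s (some 1) none = t := by
      rw [PySem.List.slice_from_one, hst]; rfl
    rw [hget0, htail]
    have hA := foldA gap t x [] []
    rw [show ((x : Int) :: ([] : List Int)) = [x] from rfl] at hA
    rw [hA]
    have hpf : prependFirst [].reverse (gsplit gap x t) = gsplit gap x t := by
      cases hg : gsplit gap x t with
      | nil => exact absurd hg (gsplit_ne_nil gap x t)
      | cons g gs => simp [prependFirst]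
    rw [hpf]
    simp only [List.nil_append, List.map_nil, List.reverse_nil]
    -- B side
    have hpair : s.Pairwise (· ≤ ·) := PySem.List.sorted_pairwise values (fun x => x)
    have hbounds := cums_gsplit gap t x 0 (hst ▸ hpair)
    have hF := rangeF gap s t x 0 (by simpa using hst)
    have hn : (s.length : Int) = ((0 + t.length + 1 : Nat) : Int) := by
      rw [hst]; push_cast; simp
    have hbreaks :
        (0 : Int) :: ((PySem.List.pyRange 1 (s.length : Int) 1).filter
            (fun i => decide (PySem.List.pyGetD s i 0 - PySem.List.pyGetD s (i - 1) 0 > gap))) ++ [(s.length : Int)]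
          = cums 0 ((gsplit gap x t).map List.length) := by
      rw [hbounds]
      rw [show ((0 : Nat) : Int) + 1 = (1 : Int) by norm_num] at hF
      rw [← hF, hn]
      norm_num
    rw [hbreaks]
    exact (sliceMap (gsplit gap x t) 0 s (by simpa [hst] using (flatten_gsplit gap x t).symm)).symm
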